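-- pv_equiv track=rewrite | github.com/GioTro/Competative_Programming_Solutions | Kattis/Python/epigdanceoff.py | solve
-- ===== SOURCE A (Python) =====
-- def solve(l):
--     res = 0
--     for i in range(len(l[0])):
--         b = True
--         for j in l:
--             if j[i] == '$':
--                 b = False
--         if b:
--             res += 1
--     return res
-- ===== SOURCE B (Python) =====
-- def solve(l):
--     bad = set()
--     for row in l:
--         for i, c in enumerate(row):
--             if c == '$':
--                 bad.add(i)
--     return sum(1 for i in range(len(l[0])) if i not in bad)
-- ===== Notes on version B (the rewrite author's own statement) =====
-- stated objective: alternative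
-- what changed: Replaces the column-major nested scan with a per-column flag by a single row-major pass that accumulates the set of columns containing '$', then counts the first row's columns not in that set.
import Mathlib
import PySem

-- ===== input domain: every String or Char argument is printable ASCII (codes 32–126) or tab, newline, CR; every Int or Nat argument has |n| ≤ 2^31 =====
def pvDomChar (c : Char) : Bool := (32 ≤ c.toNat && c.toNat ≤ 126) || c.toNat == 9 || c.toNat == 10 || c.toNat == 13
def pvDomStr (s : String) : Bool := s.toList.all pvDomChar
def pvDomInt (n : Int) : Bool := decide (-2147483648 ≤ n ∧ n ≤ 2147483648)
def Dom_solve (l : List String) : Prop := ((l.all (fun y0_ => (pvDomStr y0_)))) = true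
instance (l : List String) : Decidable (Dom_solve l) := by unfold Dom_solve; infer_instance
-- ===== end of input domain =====

-- B replaces the column-major nested scan by one row-major pass collecting the set of
-- columns containing '$', then counts the first row's columns not in that set (alternative decomposition).

-- ===== PORT A =====
def solve (l : List String) : Int :=
  (PySem.List.pyRange 0 (PySem.Str.len ((PySem.List.pyGet? l 0).getD "")) 1).foldl
    (fun res i =>
      let b := l.foldl (fun b j => if PySem.Str.pyGet? j i = some '$' then false else b) true
      if b then res + 1 else res) 0

-- ===== PORT B =====
def solve_alt (l : List String) : Int :=
  let bad : PySem.Set Int := l.foldl (fun bad row =>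
    (PySem.List.enumerate row.toList).foldl
      (fun bad p => if p.2 = '$' then PySem.Set.add bad p.1 else bad) bad) PySem.Set.empty
  (PySem.List.pyRange 0 (PySem.Str.len ((PySem.List.pyGet? l 0).getD "")) 1).foldl
    (fun acc i => if !(PySem.Set.contains bad i) then acc + 1 else acc) 0

-- ===== PRECONDITION & SPEC =====
-- Pre_ excludes the empty list (l[0] raises IndexError) and grids whose first row is
-- longer than some other row (j[i] raises IndexError in A's inner loop).
def Pre_solve (l : List String) : Prop :=
  l ≠ [] ∧ ∀ s ∈ l, PySem.Str.len (l.headD "") ≤ PySem.Str.len s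
instance (l : List String) : Decidable (Pre_solve l) := by unfold Pre_solve; infer_instance
def pvWitness_solve : List String := ["a$b", "$ab", "aaa"]
def Spec_solve (l : List String) (out : Int) : Prop := out = solve_alt l
instance (l : List String) (out : Int) : Decidable (Spec_solve l out) := by unfold Spec_solve; infer_instance

-- ===== CLAIM (what is proved, stated in full; the proofs are below) =====
def Claim_equal_solve : Prop := ∀ (l : List String), Dom_solve l → Pre_solve l → Spec_solve l (solve l)

-- ===== LEMMAS AND PROOFS =====

-- membership in the inner fold over one row's enumerate pairs
theorem mem_foldl_addIf (ps : List (Int × Char)) (s : PySem.Set Int) (x : Int) :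
    x ∈ ps.foldl (fun s p => if p.2 = '$' then PySem.Set.add s p.1 else s) s ↔
      x ∈ s ∨ ∃ p ∈ ps, p.2 = '$' ∧ p.1 = x := by
  induction ps generalizing s with
  | nil => simp
  | cons p ps ih =>
    simp only [List.foldl_cons, ih, List.mem_cons]
    by_cases h : p.2 = '$' <;> simp [h, PySem.Set.mem_add] <;> tauto

-- membership in the accumulated bad set
theorem mem_bad (l : List String) (s : PySem.Set Int) (x : Int) :
    x ∈ l.foldl (fun bad row =>
        (PySem.List.enumerate row.toList).foldl
          (fun bad p => if p.2 = '$' then PySem.Set.add bad p.1 else bad) bad) s ↔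
      x ∈ s ∨ ∃ row ∈ l, ∃ p ∈ PySem.List.enumerate row.toList, p.2 = '$' ∧ p.1 = x := by
  induction l generalizing s with
  | nil => simp
  | cons r l ih =>
    simp only [List.foldl_cons, ih, mem_foldl_addIf, List.mem_cons]
    aesop

-- A's inner flag fold
theorem flagA (l : List String) (i : Int) (init : Bool) :
    l.foldl (fun b j => if PySem.Str.pyGet? j i = some '$' then false else b) init
      = (init && l.all (fun j => !(PySem.Str.pyGet? j i == some '$'))) := by
  induction l generalizing init with
  | nil => simp
  | cons r l ih =>
    simp only [List.foldl_cons, List.all_cons, ih]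
    by_cases h : PySem.Str.pyGet? r i = some '$'
    · rw [if_pos h]
      simp only [h, beq_self_eq_true, Bool.not_true, Bool.false_and, Bool.and_false]
    · rw [if_neg h]
      simp only [beq_eq_false_iff_ne.mpr h, Bool.not_false, Bool.true_and]

theorem solve_spec : Claim_equal_solve := by
  intro l _ hpre
  obtain ⟨hne, hlen⟩ := hpre
  unfold Spec_solve solve solve_alt
  apply PySem.List.foldl_congr_mem
  intro acc x hx
  rw [PySem.List.mem_pyRange_one] at hx
  obtain ⟨hx0, hxw⟩ := hx
  rw [flagA]
  have hgood : l.all (fun j => !(PySem.Str.pyGet? j x == some '$'))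
      = !(PySem.Set.contains (l.foldl (fun bad row =>
          (PySem.List.enumerate row.toList).foldl
            (fun bad p => if p.2 = '$' then PySem.Set.add bad p.1 else bad) bad) PySem.Set.empty) x) := by
    set BAD := l.foldl (fun bad row =>
          (PySem.List.enumerate row.toList).foldl
            (fun bad p => if p.2 = '$' then PySem.Set.add bad p.1 else bad) bad) PySem.Set.empty with hBAD
    have hmb := mem_bad l PySem.Set.empty x
    rw [← hBAD] at hmb
    simp only [PySem.Set.empty, List.not_mem_nil, false_or] at hmb
    have hiff : (∃ row ∈ l, ∃ p ∈ PySem.List.enumerate row.toList, p.2 = '$' ∧ p.1 = x) ↔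
        ∃ j ∈ l, PySem.Str.pyGet? j x = some '$' := by
      constructor
      · rintro ⟨row, hrow, p, hp, hd, hpx⟩
        refine ⟨row, hrow, ?_⟩
        rw [PySem.List.mem_enumerate_iff] at hp
        obtain ⟨k, hk, rfl⟩ := hp
        simp only [zero_add] at hd hpx
        subst hpx
        rw [PySem.Str.pyGet?_natCast, List.getElem?_eq_getElem hk, hd]
      · rintro ⟨j, hj, hget⟩
        refine ⟨j, hj, ((x.toNat : Int), '$'), ?_, rfl, ?_⟩
        · rw [PySem.List.mem_enumerate_iff]
          rw [← Int.toNat_of_nonneg hx0, PySem.Str.pyGet?_natCast] at hget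
          obtain ⟨hlt, hval⟩ := List.getElem?_eq_some_iff.mp hget
          exact ⟨x.toNat, hlt, by simp [hval]⟩
        · exact Int.toNat_of_nonneg hx0
    rcases Bool.eq_false_or_eq_true (PySem.Set.contains BAD x) with hc | hc
    case inl => -- contains = true
      rw [hc, Bool.not_true]
      obtain ⟨j, hj, hget⟩ := hiff.mp (hmb.mp ((PySem.Set.contains_iff _ _).mp hc))
      rw [List.all_eq_false]
      have hget' : PySem.List.pyGet? j.toList x = some '$' := by simpa using hget
      exact ⟨j, hj, by simp [hget']⟩
    case inr => -- contains = false
      rw [hc, Bool.not_false, List.all_eq_true]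
      intro j hj
      simp only [Bool.not_eq_eq_eq_not, Bool.not_true, beq_eq_false_iff_ne]
      intro hget
      have hxb : x ∈ BAD := hmb.mpr (hiff.mpr ⟨j, hj, hget⟩)
      rw [← PySem.Set.contains_iff, hc] at hxb
      exact absurd hxb (by simp)
  rw [Bool.true_and, hgood]

-- ===== VERDICT (by name: the statement is the Claim_ definition above) =====
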